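-- pv_equiv track=rewrite | github.com/Albertzry/LeetCode | 3567-minimum-absolute-difference-in-sliding-submatrix/3567-minimum-absolute-difference-in-sliding-submatrix.py | minAbsDiff
-- ===== SOURCE A (Python) =====
-- from typing import List
--
-- def minAbsDiff(grid: List[List[int]], k: int) -> List[List[int]]:
--     m,n = len(grid), len(grid[0])
--     ans = [[0 for _ in range(n-k+1)]for _ in range(m-k+1)]
--     for i in range(m-k+1):
--         for j in range(n-k+1):
--             temp = []
--             for p in range(k):
--                 for q in range(k):
--                     temp.append(grid[i+p][j+q])
--             temp.sort()
--             diff = temp[-1] - temp[0]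
--             for r in range(k**2 -1):
--                 diff = min(diff,abs(temp[r+1]-temp[r])) if temp[r+1] - temp[r] != 0 else diff
--             ans[i][j] = diff
--     return ans
-- ===== SOURCE B (Python) =====
-- from typing import List
--
-- def minAbsDiff(grid: List[List[int]], k: int) -> List[List[int]]:
--     m, n = len(grid), len(grid[0])
--
--     def best(vals):
--         # smallest positive pairwise |difference|, 0 if none; recursion on the list
--         if not vals:
--             return 0
--         x, rest = vals[0], vals[1:]
--         b = best(rest)
--         for y in rest:
--             d = abs(x - y)
--             if d != 0 and (b == 0 or d < b):
--                 b = d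
--         return b
--
--     def block(i, j):
--         return [v for row in grid[i:i+k] for v in row[j:j+k]]
--
--     return [[best(block(i, j)) for j in range(n - k + 1)] for i in range(m - k + 1)]
-- ===== Notes on version B (the rewrite author's own statement) =====
-- stated objective: alternative
-- what changed: Per window, B extracts the block by row/column slicing instead of index loops and computes the answer by a structural recursion on the value list (fold each head against its tail, keeping the smallest positive difference) instead of A's preallocate-assign, sort and adjacent-nonzero scan.
-- outside the precondition, e.g. on minAbsDiff([[0, 2], [-2], [0, 3]], 2): A raises IndexError, B returns [[2], [2]]
import Mathlib
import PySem

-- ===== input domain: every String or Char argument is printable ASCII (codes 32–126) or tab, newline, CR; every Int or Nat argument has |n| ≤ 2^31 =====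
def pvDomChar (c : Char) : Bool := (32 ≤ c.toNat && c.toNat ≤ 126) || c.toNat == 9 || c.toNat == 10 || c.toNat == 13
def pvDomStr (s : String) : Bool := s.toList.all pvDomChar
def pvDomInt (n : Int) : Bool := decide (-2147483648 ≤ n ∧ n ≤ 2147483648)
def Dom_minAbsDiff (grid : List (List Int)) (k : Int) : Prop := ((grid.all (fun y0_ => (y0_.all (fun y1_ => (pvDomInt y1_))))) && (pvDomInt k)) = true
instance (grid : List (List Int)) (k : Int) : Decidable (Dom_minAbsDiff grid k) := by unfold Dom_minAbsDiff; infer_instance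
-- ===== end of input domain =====

-- B replaces A's index-built window + sort + adjacent-nonzero scan by slice-extracted
-- blocks and a structural recursion taking the smallest positive pairwise difference
-- (alternative algorithm, same results).

-- ===== PORT A =====
-- temp built by the two appending loops over p,q
def pvTempA (grid : List (List Int)) (k i j : Int) : List Int :=
  (PySem.List.pyRange 0 k 1).foldl (fun t p =>
    (PySem.List.pyRange 0 k 1).foldl (fun t q =>
      t ++ [PySem.List.pyGetD (PySem.List.pyGetD grid (i+p) []) (j+q) 0]) t) []

-- temp.sort(); diff = temp[-1]-temp[0]; the scan over r in range(k**2 - 1)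
def pvWinA (temp : List Int) (k : Int) : Int :=
  let s := PySem.List.sorted temp (fun x => x) false
  (PySem.List.pyRange 0 (k^2 - 1) 1).foldl
    (fun diff r =>
      if PySem.List.pyGetD s (r+1) 0 - PySem.List.pyGetD s r 0 ≠ 0
      then min diff |PySem.List.pyGetD s (r+1) 0 - PySem.List.pyGetD s r 0|
      else diff)
    (PySem.List.pyGetD s (-1) 0 - PySem.List.pyGetD s 0 0)

def minAbsDiff (grid : List (List Int)) (k : Int) : List (List Int) :=
  let m : Int := grid.length
  let n : Int := (grid.headD []).length
  (PySem.List.pyRange 0 (m - k + 1) 1).map (fun i =>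
    (PySem.List.pyRange 0 (n - k + 1) 1).map (fun j =>
      pvWinA (pvTempA grid k i j) k))

-- ===== PORT B =====
-- best(vals): recursion on the list, smallest positive pairwise |difference| (0 if none)
def pvBestB : List Int → Int
  | [] => 0
  | x :: rest =>
      rest.foldl (fun b y =>
        let d := |x - y|
        if d ≠ 0 ∧ (b = 0 ∨ d < b) then d else b) (pvBestB rest)

-- block(i, j): [v for row in grid[i:i+k] for v in row[j:j+k]]
def pvBlockB (grid : List (List Int)) (k i j : Int) : List Int :=
  (PySem.List.slice grid (some i) (some (i+k))).flatMap (fun row =>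
    PySem.List.slice row (some j) (some (j+k)))

def minAbsDiff_alt (grid : List (List Int)) (k : Int) : List (List Int) :=
  let m : Int := grid.length
  let n : Int := (grid.headD []).length
  (PySem.List.pyRange 0 (m - k + 1) 1).map (fun i =>
    (PySem.List.pyRange 0 (n - k + 1) 1).map (fun j =>
      pvBestB (pvBlockB grid k i j)))

-- ===== PRECONDITION & SPEC =====
-- A raises IndexError exactly on the excluded inputs: empty grid, k ≤ 0, or (when k×k
-- windows exist, i.e. k ≤ m and k ≤ n) a row shorter than the first row.
def Pre_minAbsDiff (grid : List (List Int)) (k : Int) : Prop :=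
  grid ≠ [] ∧ 1 ≤ k ∧
  ((k ≤ (grid.length : Int) ∧ k ≤ ((grid.headD []).length : Int)) →
    ∀ row ∈ grid, (grid.headD []).length ≤ row.length)
instance (grid : List (List Int)) (k : Int) : Decidable (Pre_minAbsDiff grid k) := by
  unfold Pre_minAbsDiff; infer_instance

def pvWitness_minAbsDiff : List (List Int) × Int := ([[1, 3], [2, 4]], 2)

def Spec_minAbsDiff (grid : List (List Int)) (k : Int) (out : List (List Int)) : Prop := out = minAbsDiff_alt grid k
instance (grid : List (List Int)) (k : Int) (out : List (List Int)) : Decidable (Spec_minAbsDiff grid k out) := by unfold Spec_minAbsDiff; infer_instance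

-- ===== CLAIM (what is proved, stated in full; the proofs are below) =====
def Claim_equal_minAbsDiff : Prop := ∀ (grid : List (List Int)) (k : Int), Dom_minAbsDiff grid k → Pre_minAbsDiff grid k → Spec_minAbsDiff grid k (minAbsDiff grid k)

-- ===== LEMMAS AND PROOFS =====

-- adjacent differences of a list
def pvGaps : List Int → List Int
  | a :: b :: r => (b - a) :: pvGaps (b :: r)
  | _ => []

-- "d is a positive pairwise difference of t"
def pvPD (t : List Int) (d : Int) : Prop := 0 < d ∧ ∃ x ∈ t, ∃ y ∈ t, d = y - x

-- B's update rule / A's update rule as binary operations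
def pvF : Int → Int → Int := fun best d => if d ≠ 0 ∧ (best = 0 ∨ d < best) then d else best
def pvG : Int → Int → Int := fun diff x => if x ≠ 0 then min diff |x| else diff

-- the characterisation both window computations satisfy
def pvChar (t : List Int) (r : Int) : Prop :=
  (∀ d, pvPD t d → r ≤ d) ∧ ((r = 0 ∧ ∀ d, ¬ pvPD t d) ∨ pvPD t r)

theorem pvChar_unique {t : List Int} {r1 r2 : Int} (h1 : pvChar t r1) (h2 : pvChar t r2) : r1 = r2 := by
  obtain ⟨lb1, c1⟩ := h1
  obtain ⟨lb2, c2⟩ := h2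
  rcases c1 with ⟨hz1, hn1⟩ | hp1
  · rcases c2 with ⟨hz2, _⟩ | hp2
    · omega
    · exact absurd hp2 (hn1 _)
  · rcases c2 with ⟨hz2, hn2⟩ | hp2
    · exact absurd hp1 (hn2 _)
    · exact le_antisymm (lb1 _ hp2) (lb2 _ hp1)

theorem pvG_fold (l : List Int) (init : Int) :
    (l.foldl pvG init = init ∨ ∃ x ∈ l, x ≠ 0 ∧ l.foldl pvG init = |x|) ∧
    l.foldl pvG init ≤ init ∧
    (∀ x ∈ l, x ≠ 0 → l.foldl pvG init ≤ |x|) := by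
  induction l generalizing init with
  | nil => simp
  | cons a l ih =>
    simp only [List.foldl_cons, List.mem_cons]
    obtain ⟨h1, h2, h3⟩ := ih (pvG init a)
    have hga : pvG init a ≤ init ∧ (a ≠ 0 → pvG init a ≤ |a|) := by
      simp only [pvG]; split_ifs with h <;> omega
    refine ⟨?_, le_trans h2 hga.1, ?_⟩
    · rcases h1 with h | ⟨x, hx, hx0, he⟩
      · by_cases ha : a = 0
        · left; rw [h]; simp [pvG, ha]
        · rw [h]; simp only [pvG, if_pos ha]
          rcases le_or_gt init |a| with hc | hc
          · left; omega
          · right; exact ⟨a, Or.inl rfl, ha, by omega⟩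
      · right; exact ⟨x, Or.inr hx, hx0, he⟩
    · rintro x (rfl | hx) hx0
      · exact le_trans h2 (hga.2 hx0)
      · exact h3 x hx hx0

theorem pvF_fold (l : List Int) (s : Int) (hl : ∀ d ∈ l, 0 ≤ d) (hs : 0 ≤ s) :
    (l.foldl pvF s = s ∨ l.foldl pvF s ∈ l) ∧
    (l.foldl pvF s = 0 ↔ (s = 0 ∧ ∀ d ∈ l, d = 0)) ∧
    (∀ d ∈ l, 0 < d → l.foldl pvF s ≤ d) ∧
    (0 < s → l.foldl pvF s ≤ s) := by
  induction l generalizing s with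
  | nil => simp
  | cons a l ih =>
    have ha : 0 ≤ a := hl a (by simp)
    have hfa : pvF s a = a ∨ pvF s a = s := by simp only [pvF]; split_ifs <;> simp
    have hfa0 : 0 ≤ pvF s a := by rcases hfa with h | h <;> omega
    have hfz : pvF s a = 0 ↔ (s = 0 ∧ a = 0) := by simp only [pvF]; split_ifs with h <;> omega
    have hfles : 0 < s → pvF s a ≤ s := by simp only [pvF]; split_ifs with h <;> omega
    simp only [List.foldl_cons, List.mem_cons]
    obtain ⟨h1, h2, h3, h4⟩ := ih (pvF s a) (fun d hd => hl d (by simp [hd])) hfa0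
    refine ⟨?_, ?_, ?_, ?_⟩
    · rcases h1 with h | h
      · rcases hfa with h' | h'
        · right; left; omega
        · left; omega
      · right; right; exact h
    · rw [h2, hfz]
      constructor
      · rintro ⟨⟨h5, h6⟩, h7⟩
        exact ⟨h5, by rintro d (rfl | hd); exact h6; exact h7 d hd⟩
      · rintro ⟨h5, h6⟩
        exact ⟨⟨h5, h6 a (Or.inl rfl)⟩, fun d hd => h6 d (Or.inr hd)⟩
    · rintro d (rfl | hd) hd0
      · have key : 0 < pvF s d ∧ pvF s d ≤ d := by
          simp only [pvF]; split_ifs <;> omega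
        exact le_trans (h4 key.1) key.2
      · exact h3 d hd hd0
    · intro hs0
      have key : 0 < pvF s a := by simp only [pvF]; split_ifs <;> omega
      exact le_trans (h4 key) (hfles hs0)

theorem pvGaps_nonneg : ∀ (t : List Int), t.Pairwise (· ≤ ·) → ∀ g ∈ pvGaps t, 0 ≤ g := by
  intro t
  induction t with
  | nil => simp [pvGaps]
  | cons a r ih =>
    intro hp g hg
    match r, hg with
    | b :: s, hg =>
      simp only [pvGaps, List.mem_cons] at hg
      rcases hg with rfl | hg
      · have := (List.pairwise_cons.mp hp).1 b (by simp); omega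
      · exact ih (List.pairwise_cons.mp hp).2 g hg

theorem pvGaps_mem_ex : ∀ (t : List Int) {g : Int}, g ∈ pvGaps t → ∃ u ∈ t, ∃ v ∈ t, g = v - u := by
  intro t
  induction t with
  | nil => simp [pvGaps]
  | cons a r ih =>
    intro g hg
    match r, hg with
    | b :: s, hg =>
      simp only [pvGaps, List.mem_cons] at hg
      rcases hg with rfl | hg
      · exact ⟨a, by simp, b, by simp, rfl⟩
      · obtain ⟨u, hu, v, hv, rfl⟩ := ih hg
        exact ⟨u, by simp [hu], v, by simp [hv], rfl⟩

theorem pvGaps_exists : ∀ (t : List Int), t.Pairwise (· ≤ ·) → ∀ {x y : Int}, x ∈ t → y ∈ t → x < y →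
    ∃ g ∈ pvGaps t, g ≠ 0 ∧ g ≤ y - x := by
  intro t
  induction t with
  | nil => simp
  | cons a r ih =>
    intro hp x y hx hy hxy
    obtain ⟨hale, hpr⟩ := List.pairwise_cons.mp hp
    have hax : a ≤ x := by
      rcases List.mem_cons.mp hx with rfl | h
      · omega
      · exact hale x h
    have hay : y ∈ r := by
      rcases List.mem_cons.mp hy with rfl | h
      · omega
      · exact h
    by_cases hxr : x ∈ r
    · obtain ⟨g, hg, hg0, hgle⟩ := ih hpr hxr hay hxy
      match r, hg with
      | b :: s, hg =>
        refine ⟨g, ?_, hg0, hgle⟩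
        simp only [pvGaps, List.mem_cons]
        exact Or.inr hg
    · have hxa : x = a := by
        rcases List.mem_cons.mp hx with rfl | h
        · rfl
        · exact absurd h hxr
      subst hxa
      match r, hay, hxr with
      | b :: s, hay, hxr =>
        have hb : b ≤ y := by
          rcases List.mem_cons.mp hay with rfl | h
          · omega
          · exact (List.pairwise_cons.mp hpr).1 y h
        have hab : x ≤ b := hale b (by simp)
        have hne : b ≠ x := fun h => hxr (h ▸ List.mem_cons_self ..)
        refine ⟨b - x, ?_, by omega, by omega⟩
        simp [pvGaps]

theorem pvHead_le {s : List Int} (hp : s.Pairwise (· ≤ ·)) {a : Int} (ha : s.headD 0 = a) (hne : s ≠ [])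
    {y : Int} (hy : y ∈ s) : a ≤ y := by
  match s, hy with
  | b :: t, hy =>
    simp at ha; subst ha
    rcases List.mem_cons.mp hy with rfl | h
    · omega
    · exact (List.pairwise_cons.mp hp).1 y h

theorem pvLe_getLast : ∀ (s : List Int), s.Pairwise (· ≤ ·) → ∀ (h : s ≠ []) {y : Int}, y ∈ s → y ≤ s.getLast h := by
  intro s
  induction s with
  | nil => simp
  | cons a r ih =>
    intro hp h y hy
    rcases List.mem_cons.mp hy with rfl | hyr
    · cases r with
      | nil => simp
      | cons b t =>
        rw [List.getLast_cons (by simp)]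
        have : b :: t ≠ [] := by simp
        have hbl := List.getLast_mem this
        exact le_trans ((List.pairwise_cons.mp hp).1 _ hbl) (le_refl _)
    · cases r with
      | nil => simp at hyr
      | cons b t =>
        rw [List.getLast_cons (by simp)]
        exact ih (List.pairwise_cons.mp hp).2 (by simp) hyr

theorem pvRange_shift (c d : Int) :
    PySem.List.pyRange (c+1) (d+1) 1 = (PySem.List.pyRange c d 1).map (· + 1) := by
  rw [PySem.List.pyRange_one, PySem.List.pyRange_one, List.map_map]
  have : d + 1 - (c + 1) = d - c := by ring
  rw [this]
  exact List.map_congr_left (fun k _ => by simp; ring)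

theorem pvGetD_cons (x : Int) (l : List Int) (i : Int) (hi : 0 ≤ i) :
    PySem.List.pyGetD (x :: l) (i+1) 0 = PySem.List.pyGetD l i 0 := by
  rw [PySem.List.pyGetD_of_nonneg _ _ (by omega : (0:Int) ≤ i + 1), PySem.List.pyGetD_of_nonneg _ _ hi]
  have : (i + 1).toNat = i.toNat + 1 := by omega
  rw [this]
  rfl

theorem pvGaps_eq_map : ∀ (s : List Int),
    (PySem.List.pyRange 0 ((s.length : Int) - 1) 1).map
      (fun r => PySem.List.pyGetD s (r+1) 0 - PySem.List.pyGetD s r 0) = pvGaps s := by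
  intro s
  induction s with
  | nil => simp [pvGaps]
  | cons a r ih =>
    cases r with
    | nil => simp [pvGaps]
    | cons b t =>
      have hlen : ((a :: b :: t).length : Int) - 1 = ((b :: t).length : Int) := by
        simp
      rw [hlen, PySem.List.pyRange_one_cons (by simp)]
      have h2 : ((b :: t).length : Int) = (((b :: t).length : Int) - 1) + 1 := by omega
      have hsh : PySem.List.pyRange (0+1) (((b :: t).length : Int)) 1
          = (PySem.List.pyRange 0 (((b :: t).length : Int) - 1) 1).map (· + 1) := by
        rw [h2, pvRange_shift 0 (((b :: t).length : Int) - 1)]; norm_num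
      simp only [List.map_cons, pvGaps]
      congr 1
      · rw [pvGetD_cons a (b :: t) 0 le_rfl, PySem.List.pyGetD_zero_cons,
          PySem.List.pyGetD_zero_cons]
      · rw [hsh, List.map_map]
        rw [List.map_congr_left (l := PySem.List.pyRange 0 (((b :: t).length : Int) - 1) 1)
          (f := _) (g := fun r => PySem.List.pyGetD (b :: t) (r+1) 0 - PySem.List.pyGetD (b :: t) r 0)
          ?_]
        · exact ih
        · intro x hx
          have hx0 : 0 ≤ x := ((PySem.List.mem_pyRange_one).mp hx).1
          simp only [Function.comp]
          rw [pvGetD_cons a (b :: t) (x+1) (by omega), pvGetD_cons a (b :: t) x hx0]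

-- A's scan written as a fold of pvG over the adjacent gaps
theorem pvWinA_eq_gaps_fold (t : List Int) (k : Int) (hlen : (t.length : Int) = k^2) :
    pvWinA t k =
      (pvGaps (PySem.List.sorted t (fun x => x) false)).foldl pvG
        (PySem.List.pyGetD (PySem.List.sorted t (fun x => x) false) (-1) 0
          - PySem.List.pyGetD (PySem.List.sorted t (fun x => x) false) 0 0) := by
  unfold pvWinA
  have hsl : k^2 - 1 = ((PySem.List.sorted t (fun x => x) false).length : Int) - 1 := by
    rw [PySem.List.length_sorted]; omega
  rw [hsl, ← pvGaps_eq_map (PySem.List.sorted t (fun x => x) false), List.foldl_map]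
  rfl

theorem pvWinA_char (t : List Int) (k : Int) (ht : t ≠ []) (hlen : (t.length : Int) = k^2) :
    pvChar t (pvWinA t k) := by
  have hmem : ∀ x : Int, x ∈ PySem.List.sorted t (fun x => x) false ↔ x ∈ t :=
    fun x => PySem.List.mem_sorted t _ _ x
  have hsp : (PySem.List.sorted t (fun x => x) false).Pairwise (· ≤ ·) :=
    PySem.List.sorted_pairwise t _
  have hsne : PySem.List.sorted t (fun x => x) false ≠ [] := by
    rw [Ne, PySem.List.sorted_eq_nil_iff]; exact ht
  rw [pvWinA_eq_gaps_fold t k hlen]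
  generalize hseq : PySem.List.sorted t (fun x => x) false = s at *
  have hhead : PySem.List.pyGetD s 0 0 = s.headD 0 := by
    match s, hsne with
    | a :: l, _ => rw [PySem.List.pyGetD_zero_cons]; rfl
  rw [PySem.List.pyGetD_neg_one s 0 hsne, hhead]
  have hh : s.headD 0 ∈ s := by
    match s, hsne with
    | a :: l, _ => simp
  have hl : s.getLast hsne ∈ s := List.getLast_mem hsne
  obtain ⟨h1, h2, h3⟩ := pvG_fold (pvGaps s) (s.getLast hsne - s.headD 0)
  constructor
  · rintro d ⟨hd0, x, hx, y, hy, rfl⟩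
    rw [← hmem] at hx hy
    obtain ⟨g, hg, hg0, hgle⟩ := pvGaps_exists s hsp hx hy (by omega)
    have hgpos : 0 ≤ g := pvGaps_nonneg s hsp g hg
    have := h3 g hg hg0
    have : (pvGaps s).foldl pvG (s.getLast hsne - s.headD 0) ≤ g := by
      have habs : |g| = g := abs_of_nonneg hgpos
      omega
    omega
  · have hinit0 : 0 ≤ s.getLast hsne - s.headD 0 := by
      have := pvHead_le hsp rfl hsne hl
      omega
    rcases h1 with hr | ⟨g, hg, hg0, hr⟩
    · by_cases hz : s.getLast hsne - s.headD 0 = 0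
      · left
        refine ⟨by omega, ?_⟩
        rintro d ⟨hd0, x, hx, y, hy, rfl⟩
        rw [← hmem] at hx hy
        have hx1 := pvHead_le hsp rfl hsne hx
        have hx2 := pvLe_getLast s hsp hsne hx
        have hy1 := pvHead_le hsp rfl hsne hy
        have hy2 := pvLe_getLast s hsp hsne hy
        omega
      · right
        refine ⟨by omega, s.headD 0, (hmem _).mp hh, s.getLast hsne, (hmem _).mp hl, by omega⟩
    · right
      have hgpos : 0 ≤ g := pvGaps_nonneg s hsp g hg
      obtain ⟨u, hu, v, hv, rfl⟩ := pvGaps_mem_ex s hg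
      refine ⟨?_, u, (hmem _).mp hu, v, (hmem _).mp hv, ?_⟩
      · have : |v - u| = v - u := abs_of_nonneg hgpos
        omega
      · have : |v - u| = v - u := abs_of_nonneg hgpos
        omega

-- B's recursion satisfies the same characterisation
theorem pvBestB_char : ∀ (v : List Int), pvChar v (pvBestB v) := by
  intro v
  induction v with
  | nil =>
    exact ⟨fun d hd => absurd hd (by rintro ⟨_, x, hx, _⟩; simp at hx),
      Or.inl ⟨rfl, by rintro d ⟨_, x, hx, _⟩; simp at hx⟩⟩
  | cons x rest ih =>
    have hinit0 : 0 ≤ pvBestB rest := by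
      rcases ih.2 with ⟨hz, _⟩ | ⟨hp, _⟩ <;> omega
    have heq : pvBestB (x :: rest)
        = (rest.map (fun y => |x - y|)).foldl pvF (pvBestB rest) := by
      show rest.foldl _ _ = _
      rw [List.foldl_map]
      rfl
    obtain ⟨h1, h2, h3, h4⟩ := pvF_fold (rest.map (fun y => |x - y|)) (pvBestB rest)
      (by rintro d hd; obtain ⟨y, _, rfl⟩ := List.mem_map.mp hd; exact abs_nonneg _) hinit0
    rw [heq]
    constructor
    · rintro d ⟨hd0, a, ha, b, hb, rfl⟩
      rcases List.mem_cons.mp ha with rfl | har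
      · rcases List.mem_cons.mp hb with rfl | hbr
        · omega
        · have hm : |a - b| ∈ rest.map (fun y => |a - y|) := List.mem_map_of_mem hbr
          have := h3 _ hm (by rw [abs_of_nonpos (by omega)]; omega)
          rw [abs_of_nonpos (by omega)] at this
          omega
      · rcases List.mem_cons.mp hb with rfl | hbr
        · have hm : |b - a| ∈ rest.map (fun y => |b - y|) := List.mem_map_of_mem har
          have := h3 _ hm (by rw [abs_of_nonneg (by omega)]; omega)
          rw [abs_of_nonneg (by omega)] at this
          omega
        · have hpd : pvPD rest (b - a) := ⟨hd0, a, har, b, hbr, rfl⟩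
          have hle := ih.1 _ hpd
          have hpos : 0 < pvBestB rest := by
            rcases ih.2 with ⟨hz, hn⟩ | ⟨hp, _⟩
            · exact absurd hpd (hn _)
            · omega
          have := h4 hpos
          omega
    · by_cases hz : (rest.map (fun y => |x - y|)).foldl pvF (pvBestB rest) = 0
      · left
        obtain ⟨hiz, hall⟩ := h2.mp hz
        have hrn : ∀ d, ¬ pvPD rest d := by
          rcases ih.2 with ⟨_, hn⟩ | ⟨hp, _⟩
          · exact hn
          · omega
        have hxy : ∀ y ∈ rest, y = x := by
          intro y hy
          have := hall _ (List.mem_map_of_mem hy)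
          have := abs_eq_zero.mp this
          omega
        refine ⟨hz, ?_⟩
        rintro d ⟨hd0, a, ha, b, hb, rfl⟩
        have hax : a = x := by
          rcases List.mem_cons.mp ha with rfl | h; rfl; exact hxy a h
        have hbx : b = x := by
          rcases List.mem_cons.mp hb with rfl | h; rfl; exact hxy b h
        omega
      · right
        rcases h1 with hr | hr
        · rw [hr] at hz ⊢
          rcases ih.2 with ⟨hz', _⟩ | ⟨hp, a, ha, b, hb, he⟩
          · exact absurd hz' hz
          · exact ⟨hp, a, List.mem_cons_of_mem _ ha, b, List.mem_cons_of_mem _ hb, he⟩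
        · obtain ⟨y, hy, he⟩ := List.mem_map.mp hr
          have hpos : 0 < (rest.map (fun y => |x - y|)).foldl pvF (pvBestB rest) := by
            have : 0 ≤ |x - y| := abs_nonneg _
            omega
          rcases le_total x y with hxy | hxy
          · refine ⟨hpos, x, List.mem_cons_self .., y, List.mem_cons_of_mem _ hy, ?_⟩
            rw [← he, abs_of_nonpos (by omega)]; ring
          · refine ⟨hpos, y, List.mem_cons_of_mem _ hy, x, List.mem_cons_self .., ?_⟩
            rw [← he, abs_of_nonneg (by omega)]

-- the index-comprehension form of the window, used to relate both ports' windows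
def pvForm (grid : List (List Int)) (k i j : Int) : List Int :=
  (PySem.List.pyRange 0 k 1).flatMap (fun p =>
    (PySem.List.pyRange 0 k 1).map (fun q =>
      PySem.List.pyGetD (PySem.List.pyGetD grid (i+p) []) (j+q) 0))

theorem pvTemp_eq (grid : List (List Int)) (k i j : Int) :
    pvTempA grid k i j = pvForm grid k i j := by
  unfold pvTempA pvForm
  simp only [PySem.List.foldl_append_singleton_eq_map]
  rw [PySem.List.foldl_append_eq_flatMap]
  simp

theorem pvForm_length (grid : List (List Int)) (k i j : Int) :
    (pvForm grid k i j).length = k.toNat * k.toNat := by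
  unfold pvForm
  simp [List.length_flatMap, PySem.List.length_pyRange_one, List.map_const']

theorem pvForm_length_int (grid : List (List Int)) (k i j : Int) (hk : 1 ≤ k) :
    ((pvForm grid k i j).length : Int) = k^2 := by
  rw [pvForm_length]
  push_cast [Int.toNat_of_nonneg (by omega : (0:Int) ≤ k)]
  ring

theorem pvForm_ne_nil (grid : List (List Int)) (k i j : Int) (hk : 1 ≤ k) :
    pvForm grid k i j ≠ [] := by
  have h := pvForm_length grid k i j
  intro hcon
  rw [hcon] at h
  simp at h
  omega

-- a slice fully inside the list is the map of lookups over the index range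
theorem pvSlice_eq_map {α : Type} (l : List α) (d : α) (a : Int) (c : Nat)
    (ha : 0 ≤ a) (h : a.toNat + c ≤ l.length) :
    PySem.List.slice l (some a) (some (a + (c : Int)))
      = (PySem.List.pyRange 0 (c : Int) 1).map (fun p => PySem.List.pyGetD l (a + p) d) := by
  have ha' : a = (a.toNat : Int) := (Int.toNat_of_nonneg ha).symm
  rw [ha', PySem.List.slice_natCast_add, PySem.List.pyRange_zero_natCast, List.map_map]
  apply List.ext_getElem
  · simp; omega
  · intro t h1 h2
    simp only [List.getElem_take, List.getElem_drop, List.getElem_map, List.getElem_range,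
      Function.comp]
    rw [PySem.List.pyGetD_of_nonneg _ _ (by positivity)]
    have h3 : ((a.toNat:Int) + (t:Int)).toNat = a.toNat + t := by omega
    rw [h3, List.getD_eq_getElem _ _ (by simp at h1; omega)]

theorem pvForm_eq_block (grid : List (List Int)) (k i j : Int) (hk : 1 ≤ k)
    (hi : 0 ≤ i) (him : i.toNat + k.toNat ≤ grid.length)
    (hj : 0 ≤ j) (hrow : ∀ row ∈ grid, j.toNat + k.toNat ≤ row.length) :
    pvForm grid k i j = pvBlockB grid k i j := by
  obtain ⟨c, rfl⟩ : ∃ c : Nat, k = (c : Int) := ⟨k.toNat, (Int.toNat_of_nonneg (by omega)).symm⟩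
  unfold pvForm pvBlockB
  rw [pvSlice_eq_map grid [] i c hi (by simpa using him), List.flatMap_map]
  apply List.flatMap_congr
  intro p hp
  have hp0 : 0 ≤ p := (PySem.List.mem_pyRange_one.mp hp).1
  have hpc : p < (c : Int) := (PySem.List.mem_pyRange_one.mp hp).2
  have hmem : PySem.List.pyGetD grid (i + p) [] ∈ grid := by
    rw [PySem.List.pyGetD_of_nonneg _ _ (by omega)]
    rw [List.getD_eq_getElem _ _ (by simp at him ⊢; omega)]
    exact List.getElem_mem _
  have hlen : j.toNat + c ≤ (PySem.List.pyGetD grid (i + p) []).length := by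
    have := hrow _ hmem
    simpa using this
  exact (pvSlice_eq_map _ 0 j c hj hlen).symm

-- ===== VERDICT (by name: the statement is the Claim_ definition above) =====
theorem minAbsDiff_spec : Claim_equal_minAbsDiff := by
  intro grid k _ hpre
  obtain ⟨hne, hk, hrows⟩ := hpre
  unfold Spec_minAbsDiff minAbsDiff minAbsDiff_alt
  apply List.map_congr_left
  intro i hi
  apply List.map_congr_left
  intro j hj
  obtain ⟨hi0, hilt⟩ := PySem.List.mem_pyRange_one.mp hi
  obtain ⟨hj0, hjlt⟩ := PySem.List.mem_pyRange_one.mp hj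
  have hkm : k ≤ (grid.length : Int) := by omega
  have hkn : k ≤ ((grid.headD []).length : Int) := by omega
  have hrow' : ∀ row ∈ grid, j.toNat + k.toNat ≤ row.length := by
    intro row hr
    have := hrows ⟨hkm, hkn⟩ row hr
    omega
  have hblk : pvTempA grid k i j = pvBlockB grid k i j := by
    rw [pvTemp_eq, pvForm_eq_block grid k i j hk hi0 (by omega) hj0 hrow']
  rw [hblk]
  rw [← pvForm_eq_block grid k i j hk hi0 (by omega) hj0 hrow']
  exact pvChar_unique
    (pvWinA_char _ k (pvForm_ne_nil grid k i j hk) (pvForm_length_int grid k i j hk))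
    (pvBestB_char _)
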